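-- pv_equiv track=rewrite | github.com/TeeKay-FourTwentyOne/math | ramsey-book-graphs/n23_fast_sa.py | compute_all_deltas
-- ===== SOURCE A (Python) =====
-- m = 45
--
-- def compute_all_deltas(S_set):
--     """Compute Delta(S, S, d) for all d in {1,...,m-1}."""
--     indicator = [0] * m
--     for x in S_set:
--         indicator[x % m] = 1
--     deltas = [0] * m
--     for d in range(1, m):
--         count = 0
--         for x in range(m):
--             if indicator[x] and indicator[(x - d) % m]:
--                 count += 1
--         deltas[d] = count
--     return deltas
-- ===== SOURCE B (Python) =====
-- m = 45
--
-- def compute_all_deltas(S_set):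
--     """Compute Delta(S, S, d) for all d in {1,...,m-1}."""
--     residues = sorted(set(x % m for x in S_set))
--     deltas = [0] * m
--     for a in residues:
--         for b in residues:
--             d = (a - b) % m
--             if d:
--                 deltas[d] += 1
--     return deltas
-- ===== Notes on version B (the rewrite author's own statement) =====
-- stated objective: alternative
-- what changed: Instead of scanning all m positions for each of the m-1 shifts against an indicator array, B collects the distinct residues present and scatters one increment per ordered pair of present residues into deltas[(a-b)%m], skipping d=0.
import Mathlib
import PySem

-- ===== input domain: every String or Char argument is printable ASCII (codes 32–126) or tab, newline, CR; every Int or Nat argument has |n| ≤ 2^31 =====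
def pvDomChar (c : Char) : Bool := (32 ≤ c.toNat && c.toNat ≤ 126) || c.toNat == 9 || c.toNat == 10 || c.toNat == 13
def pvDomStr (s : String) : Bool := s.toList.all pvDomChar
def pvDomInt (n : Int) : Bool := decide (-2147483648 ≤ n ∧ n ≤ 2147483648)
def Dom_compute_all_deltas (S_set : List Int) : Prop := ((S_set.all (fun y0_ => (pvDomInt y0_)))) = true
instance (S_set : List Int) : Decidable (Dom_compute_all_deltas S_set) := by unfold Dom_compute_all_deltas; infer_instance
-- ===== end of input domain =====

-- B replaces A's per-shift full scan of an indicator array (m*(m-1) tests) by one increment per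
-- ordered pair of distinct residues present, scattered into deltas[(a-b)%m]; objective: an
-- alternative pass shape (pairs of present residues instead of per-shift scans), same cost.

-- ===== PORT A =====
-- indicator[x % m] = 1 : index (PySem.Int.mod x 45).toNat is exact, Python's x % 45 lies in [0,45)
def compute_all_deltas (S_set : List Int) : List Int :=
  let indicator := S_set.foldl (fun ind x => ind.set (PySem.Int.mod x 45).toNat 1) (List.replicate 45 (0:Int))
  (List.range' 1 44).foldl (fun dl d =>
      dl.set d ((List.range 45).foldl (fun c x =>
        if indicator.getD x 0 ≠ 0 ∧ indicator.getD (PySem.Int.mod ((x:Int) - (d:Int)) 45).toNat 0 ≠ 0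
        then c + 1 else c) (0:Int)))
    (List.replicate 45 (0:Int))

-- ===== PORT B =====
-- sorted(set(x % m for x in S_set)); deltas[d] += 1 per ordered pair with d = (a-b) % m ≠ 0
def compute_all_deltas_alt (S_set : List Int) : List Int :=
  let residues := PySem.List.sorted (PySem.Set.ofList (S_set.map (fun x => PySem.Int.mod x 45))) (fun r => r) false
  residues.foldl (fun dl a =>
    residues.foldl (fun dl b =>
      let d := (PySem.Int.mod (a - b) 45).toNat
      if d ≠ 0 then dl.set d (dl.getD d 0 + 1) else dl) dl)
    (List.replicate 45 (0:Int))

-- ===== PRECONDITION & SPEC =====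
def Spec_compute_all_deltas (S_set : List Int) (out : List Int) : Prop := out = compute_all_deltas_alt S_set
instance (S_set : List Int) (out : List Int) : Decidable (Spec_compute_all_deltas S_set out) := by unfold Spec_compute_all_deltas; infer_instance

-- ===== CLAIM (what is proved, stated in full; the proofs are below) =====
def Claim_equal_compute_all_deltas : Prop := ∀ (S_set : List Int), Dom_compute_all_deltas S_set → Spec_compute_all_deltas S_set (compute_all_deltas S_set)

-- ===== LEMMAS AND PROOFS =====

-- the set of residues of S_set mod 45, as a membership predicate target
def pvRes (S : List Int) : List Int := S.map (fun x => PySem.Int.mod x 45)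

-- the canonical count both programs compute at shift i
def pvCount (S : List Int) (i : Nat) : Int :=
  (((List.range 45).countP (fun (x : Nat) =>
      decide ((x:Int) ∈ pvRes S) && decide (PySem.Int.mod ((x:Int) - (i:Int)) 45 ∈ pvRes S)) : Nat) : Int)

lemma pm_lb (x : Int) : 0 ≤ PySem.Int.mod x 45 := PySem.Int.mod_nonneg x (by norm_num)
lemma pm_ub (x : Int) : PySem.Int.mod x 45 < 45 := PySem.Int.mod_lt x (by norm_num)

lemma mem_res_bounds {S : List Int} {r : Int} (h : r ∈ pvRes S) : 0 ≤ r ∧ r < 45 := by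
  simp only [pvRes, List.mem_map] at h
  obtain ⟨x, -, rfl⟩ := h
  exact ⟨pm_lb x, pm_ub x⟩

lemma getD_set_45 (l : List Int) (h : l.length = 45) (j : Nat) (hj : j < 45) (v : Int) (i : Nat) :
    (l.set j v).getD i 0 = if j = i then v else l.getD i 0 := by
  simp only [List.getD_eq_getElem?_getD, List.getElem?_set]
  by_cases hij : j = i
  · subst hij; simp [h, hj]
  · simp [hij]

-- indicator characterization
lemma ind_len (S : List Int) (init : List Int) :
    (S.foldl (fun ind x => ind.set (PySem.Int.mod x 45).toNat 1) init).length = init.length := by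
  induction S generalizing init with
  | nil => rfl
  | cons x S ih => rw [List.foldl_cons, ih]; simp

lemma ind_getD (S : List Int) (init : List Int) (hlen : init.length = 45) (i : Nat) (hi : i < 45) :
    (S.foldl (fun ind x => ind.set (PySem.Int.mod x 45).toNat 1) init).getD i 0
      = if (i:Int) ∈ pvRes S then 1 else init.getD i 0 := by
  induction S generalizing init with
  | nil => simp [pvRes]
  | cons x S ih =>
      rw [List.foldl_cons, ih _ (by simp [hlen])]
      have hb1 := pm_lb x; have hb2 := pm_ub x
      rw [getD_set_45 init hlen _ (by omega) 1 i]
      have hmem : ((i:Int) ∈ pvRes (x :: S)) ↔ (PySem.Int.mod x 45 = (i:Int) ∨ (i:Int) ∈ pvRes S) := by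
        simp [pvRes, eq_comm]
      have hidx : ((PySem.Int.mod x 45).toNat = i) ↔ (PySem.Int.mod x 45 = (i:Int)) := by omega
      by_cases h1 : (i:Int) ∈ pvRes S
      · rw [if_pos h1, if_pos (hmem.mpr (Or.inr h1))]
      · by_cases h2 : PySem.Int.mod x 45 = (i:Int)
        · rw [if_neg h1, if_pos (hidx.mpr h2), if_pos (hmem.mpr (Or.inl h2))]
        · rw [if_neg h1, if_neg (fun hc => h2 (hidx.mp hc)),
              if_neg (fun hc => (hmem.mp hc).elim h2 h1)]

-- A's deltas list: fold of sets at indices from a list, the written value not depending on the accumulator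
lemma set_fold_len (f : Nat → Int) (ds : List Nat) (init : List Int) :
    (ds.foldl (fun dl d => dl.set d (f d)) init).length = init.length := by
  induction ds generalizing init with
  | nil => rfl
  | cons d ds ih => simp [List.foldl_cons, ih]

lemma set_fold_getD (f : Nat → Int) (ds : List Nat) (hds : ∀ d ∈ ds, d < 45)
    (init : List Int) (hlen : init.length = 45) (i : Nat) :
    (ds.foldl (fun dl d => dl.set d (f d)) init).getD i 0
      = if i ∈ ds then f i else init.getD i 0 := by
  induction ds generalizing init with
  | nil => simp
  | cons d ds ih =>
      rw [List.foldl_cons, ih (fun x hx => hds x (by simp [hx])) _ (by simp [hlen])]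
      rw [getD_set_45 init hlen d (hds d (by simp)) (f d) i]
      by_cases h1 : i ∈ ds
      · rw [if_pos h1, if_pos (List.mem_cons_of_mem d h1)]
      · by_cases h2 : d = i
        · rw [if_neg h1, if_pos h2, if_pos (h2 ▸ List.mem_cons_self), h2]
        · rw [if_neg h1, if_neg h2,
              if_neg (fun hc => ((List.mem_cons.mp hc).elim (fun h => h2 h.symm) h1))]

-- B's nested increment fold
lemma incr_inner_len (a : Int) (bs : List Int) (init : List Int) :
    (bs.foldl (fun dl b =>
        if (PySem.Int.mod (a - b) 45).toNat ≠ 0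
        then dl.set (PySem.Int.mod (a - b) 45).toNat
              (dl.getD (PySem.Int.mod (a - b) 45).toNat 0 + 1) else dl) init).length
      = init.length := by
  induction bs generalizing init with
  | nil => rfl
  | cons b bs ih =>
      rw [List.foldl_cons, ih]
      split <;> simp

lemma incr_inner_getD (a : Int) (bs : List Int) (init : List Int) (hlen : init.length = 45)
    (i : Nat) (_hi : i < 45) :
    (bs.foldl (fun dl b =>
        if (PySem.Int.mod (a - b) 45).toNat ≠ 0
        then dl.set (PySem.Int.mod (a - b) 45).toNat
              (dl.getD (PySem.Int.mod (a - b) 45).toNat 0 + 1) else dl) init).getD i 0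
      = init.getD i 0 + (if i = 0 then 0 else
          ((bs.countP (fun b => (PySem.Int.mod (a - b) 45).toNat == i) : Nat) : Int)) := by
  induction bs generalizing init with
  | nil => simp
  | cons b bs ih =>
      rw [List.foldl_cons, List.countP_cons]
      have hd1 := pm_lb (a - b); have hd2 := pm_ub (a - b)
      by_cases h0 : (PySem.Int.mod (a - b) 45).toNat ≠ 0
      · rw [if_pos h0, ih _ (by simp [hlen])]
        rw [getD_set_45 init hlen _ (by omega) _ i]
        by_cases hdi : (PySem.Int.mod (a - b) 45).toNat = i
        · have hi0 : ¬ i = 0 := by omega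
          rw [if_pos hdi, hdi, if_neg hi0, if_neg hi0, if_pos (by simp)]
          push_cast; ring
        · rw [if_neg hdi]
          have hp : ((PySem.Int.mod (a - b) 45).toNat == i) = false :=
            beq_eq_false_iff_ne.mpr hdi
          simp only [hp, Bool.false_eq_true, if_false, Nat.add_zero]
      · rw [if_neg h0, ih _ hlen]
        have h0' : (PySem.Int.mod (a - b) 45).toNat = 0 := not_not.mp h0
        by_cases hi0 : i = 0
        · rw [if_pos hi0, if_pos hi0]
        · have hp : ((PySem.Int.mod (a - b) 45).toNat == i) = false :=
            beq_eq_false_iff_ne.mpr (by omega)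
          rw [if_neg hi0, if_neg hi0]
          simp only [hp, Bool.false_eq_true, if_false, Nat.add_zero]

lemma incr_outer_getD (as bs : List Int) (init : List Int) (hlen : init.length = 45)
    (i : Nat) (hi : i < 45) :
    (as.foldl (fun dl a => bs.foldl (fun dl b =>
        if (PySem.Int.mod (a - b) 45).toNat ≠ 0
        then dl.set (PySem.Int.mod (a - b) 45).toNat
              (dl.getD (PySem.Int.mod (a - b) 45).toNat 0 + 1) else dl) dl) init).getD i 0
      = init.getD i 0 + (if i = 0 then 0 else
          (as.map (fun a => ((bs.countP (fun b => (PySem.Int.mod (a - b) 45).toNat == i) : Nat) : Int))).sum) := by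
  induction as generalizing init with
  | nil => simp
  | cons a as ih =>
      rw [List.foldl_cons, ih _ (by rw [incr_inner_len, hlen])]
      rw [incr_inner_getD a bs init hlen i hi]
      by_cases hi0 : i = 0 <;> simp [hi0] <;> ring

lemma incr_outer_len (as bs : List Int) (init : List Int) :
    (as.foldl (fun dl a => bs.foldl (fun dl b =>
        if (PySem.Int.mod (a - b) 45).toNat ≠ 0
        then dl.set (PySem.Int.mod (a - b) 45).toNat
              (dl.getD (PySem.Int.mod (a - b) 45).toNat 0 + 1) else dl) dl) init).length
      = init.length := by
  induction as generalizing init with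
  | nil => rfl
  | cons a as ih => rw [List.foldl_cons, ih, incr_inner_len]

-- the modular shift bijection: for b ∈ [0,45), (a-b) % 45 = i ↔ b = (a-i) % 45
lemma mod_shift (a b i : Int) (hb0 : 0 ≤ b) (hb : b < 45) (hi0 : 0 ≤ i) (hi : i < 45) :
    PySem.Int.mod (a - b) 45 = i ↔ b = PySem.Int.mod (a - i) 45 := by
  rw [PySem.Int.mod_eq_emod_of_pos (by norm_num : (0:Int) < 45),
      PySem.Int.mod_eq_emod_of_pos (by norm_num : (0:Int) < 45)]
  omega

-- the residue universe 0..44 as a list of Int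
def pvCanon : List Int := (List.range 45).map (fun (n : Nat) => (n : Int))

lemma canon_pairwise : List.Pairwise (fun a b => a < b) pvCanon :=
  List.Pairwise.map (fun (n : Nat) => (n : Int)) (fun a b h => by show (a:Int) < (b:Int); exact_mod_cast h) List.pairwise_lt_range

lemma mem_canon (r : Int) : r ∈ pvCanon ↔ 0 ≤ r ∧ r < 45 := by
  simp only [pvCanon, List.mem_map, List.mem_range]
  constructor
  · rintro ⟨n, hn, rfl⟩; omega
  · intro h; exact ⟨r.toNat, by omega, by omega⟩

-- R = sorted(set(residues)) equals the filter of 0..44 by residue membership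
lemma R_eq (S : List Int) :
    PySem.List.sorted (PySem.Set.ofList (pvRes S)) (fun r => r) false
      = pvCanon.filter (fun r => decide (r ∈ pvRes S)) := by
  apply PySem.List.sorted_eq_of_perm_of_pairwise_lt
  · refine (List.perm_ext_iff_of_nodup
      (List.Nodup.filter _ (canon_pairwise.imp ne_of_lt)) (PySem.Set.nodup_ofList _)).mpr ?_
    intro r
    simp only [List.mem_filter, PySem.Set.mem_ofList, decide_eq_true_eq, mem_canon]
    constructor
    · rintro ⟨-, h⟩; exact h
    · intro h; exact ⟨mem_res_bounds h, h⟩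
  · exact List.Pairwise.filter _ canon_pairwise

lemma R_mem (S : List Int) (r : Int) :
    r ∈ PySem.List.sorted (PySem.Set.ofList (pvRes S)) (fun x => x) false ↔ r ∈ pvRes S := by
  rw [PySem.List.mem_sorted, PySem.Set.mem_ofList]

lemma R_nodup (S : List Int) :
    (PySem.List.sorted (PySem.Set.ofList (pvRes S)) (fun x => x) false).Nodup :=
  ((PySem.List.sorted_perm _ _ _).nodup_iff).mpr (PySem.Set.nodup_ofList _)

-- count over present residues b of (a-b)%45 = i : at most one such b exists
lemma cnt_eq (S : List Int) (a : Int) (i : Nat) (hi0 : 1 ≤ i) (hi : i < 45) :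
    ((PySem.List.sorted (PySem.Set.ofList (pvRes S)) (fun x => x) false).countP
        (fun b => (PySem.Int.mod (a - b) 45).toNat == i))
      = if PySem.Int.mod (a - (i:Int)) 45 ∈ pvRes S then 1 else 0 := by
  set R := PySem.List.sorted (PySem.Set.ofList (pvRes S)) (fun x => x) false with hR
  have hcongr : R.countP (fun b => (PySem.Int.mod (a - b) 45).toNat == i)
      = R.countP (fun b => b == PySem.Int.mod (a - (i:Int)) 45) := by
    apply List.countP_congr
    intro b hb
    obtain ⟨hb0, hb45⟩ := mem_res_bounds ((R_mem S b).mp hb)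
    have h1 := pm_lb (a - b)
    have hiff := mod_shift a b (i:Int) hb0 hb45 (by omega) (by exact_mod_cast hi)
    simp only [beq_iff_eq]
    constructor
    · intro h; exact hiff.mp (by omega)
    · intro h; have := hiff.mpr h; omega
  rw [hcongr]
  rw [show R.countP (fun b => b == PySem.Int.mod (a - (i:Int)) 45)
      = R.count (PySem.Int.mod (a - (i:Int)) 45) from rfl]
  by_cases hm : PySem.Int.mod (a - (i:Int)) 45 ∈ pvRes S
  · rw [if_pos hm, List.count_eq_one_of_mem (R_nodup S) ((R_mem S _).mpr hm)]
  · rw [if_neg hm, List.count_eq_zero_of_not_mem (fun hc => hm ((R_mem S _).mp hc))]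

-- B computes pvCount
lemma B_getD (S : List Int) (i : Nat) (hi : i < 45) :
    (compute_all_deltas_alt S).getD i 0 = if i = 0 then 0 else pvCount S i := by
  unfold compute_all_deltas_alt
  simp only []
  rw [show (S.map (fun x => PySem.Int.mod x 45)) = pvRes S from rfl]
  rw [incr_outer_getD _ _ _ (by simp) i hi]
  by_cases hi0 : i = 0
  · subst hi0
    rw [if_pos rfl, if_pos rfl, List.getD_replicate _ (by norm_num), add_zero]
  · rw [if_neg hi0, if_neg hi0, List.getD_replicate _ hi, zero_add]
    have hi1 : 1 ≤ i := by omega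
    set R := PySem.List.sorted (PySem.Set.ofList (pvRes S)) (fun x => x) false with hR
    rw [List.map_congr_left (fun a _ => by
      rw [cnt_eq S a i hi1 hi])]
    rw [show (fun a => ((if PySem.Int.mod (a - (i:Int)) 45 ∈ pvRes S then 1 else 0 : Nat) : Int))
        = (fun a => if (fun a => decide (PySem.Int.mod (a - (i:Int)) 45 ∈ pvRes S)) a = true then 1 else 0) from by
      funext a; by_cases h : PySem.Int.mod (a - (i:Int)) 45 ∈ pvRes S <;> simp [h]]
    rw [PySem.List.sum_map_ite_one_zero]
    rw [hR, R_eq S, List.countP_filter, pvCount]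
    norm_cast
    rw [pvCanon, List.countP_map]
    exact List.countP_congr (fun x _ => by simp [Bool.and_comm, Int.subNatNat_eq_coe])

-- A computes pvCount
lemma A_getD (S : List Int) (i : Nat) (hi : i < 45) :
    (compute_all_deltas S).getD i 0 = if i = 0 then 0 else pvCount S i := by
  unfold compute_all_deltas
  simp only []
  rw [set_fold_getD _ _ (fun d hd => by
        obtain ⟨k, hk, rfl⟩ := List.mem_range'.mp hd; omega) _ (by simp) i]
  have hmem : i ∈ List.range' 1 44 ↔ ¬ (i = 0) := by
    rw [List.mem_range']
    constructor
    · rintro ⟨k, hk, rfl⟩; omega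
    · intro h; exact ⟨i - 1, by omega, by omega⟩
  by_cases hi0 : i = 0
  · simp [hmem, hi0]
  · rw [if_pos (hmem.mpr hi0), if_neg hi0]
    set ind := S.foldl (fun ind x => ind.set (PySem.Int.mod x 45).toNat 1) (List.replicate 45 (0:Int)) with hind
    have hlen : ind.length = 45 := by rw [hind, ind_len]; simp
    have hchar : ∀ j : Nat, j < 45 → ind.getD j 0 = if (j:Int) ∈ pvRes S then 1 else 0 := by
      intro j hj
      rw [hind, ind_getD S _ (by simp) j hj]
      by_cases h : (j:Int) ∈ pvRes S
      · rw [if_pos h, if_pos h]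
      · rw [if_neg h, if_neg h, List.getD_replicate _ hj]
    have hfun : (fun (c:Int) x =>
        if ind.getD x 0 ≠ 0 ∧ ind.getD (PySem.Int.mod ((x:Int) - (i:Int)) 45).toNat 0 ≠ 0
        then c + 1 else c)
        = (fun (c:Int) (x:Nat) =>
          if (fun (x:Nat) => decide ((x:Int) ∈ pvRes S)
              && decide (PySem.Int.mod ((x:Int) - (i:Int)) 45 ∈ pvRes S)) x = true
          then c + 1 else c) := by
      funext c x
      refine if_congr ?_ rfl rfl
      by_cases hx : x < 45
      · have h1 := hchar x hx
        have hb1 := pm_lb ((x:Int) - (i:Int)); have hb2 := pm_ub ((x:Int) - (i:Int))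
        have h2 := hchar (PySem.Int.mod ((x:Int) - (i:Int)) 45).toNat (by omega)
        rw [Int.toNat_of_nonneg hb1] at h2
        rw [h1, h2]
        by_cases m1 : (x:Int) ∈ pvRes S <;>
          by_cases m2 : PySem.Int.mod ((x:Int) - (i:Int)) 45 ∈ pvRes S <;>
          simp [m1, m2]
      · -- x ≥ 45 never occurs in range 45; both conditions false: ind.getD x 0 = 0 out of range
        have h1 : ind.getD x 0 = 0 := by
          rw [List.getD_eq_getElem?_getD, List.getElem?_eq_none (by omega)]; rfl
        have m1 : ¬ ((x:Int) ∈ pvRes S) := fun h => by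
          have := mem_res_bounds h; omega
        rw [h1]
        simp [m1]
    rw [hfun, PySem.List.foldl_count_if, zero_add]
    rfl

lemma A_len (S : List Int) : (compute_all_deltas S).length = 45 := by
  unfold compute_all_deltas
  rw [set_fold_len]
  simp

lemma B_len (S : List Int) : (compute_all_deltas_alt S).length = 45 := by
  unfold compute_all_deltas_alt
  rw [incr_outer_len]
  simp

-- ===== VERDICT (by name: the statement is the Claim_ definition above) =====
theorem compute_all_deltas_spec : Claim_equal_compute_all_deltas := by
  intro S _
  show compute_all_deltas S = compute_all_deltas_alt S
  apply List.ext_getElem (by rw [A_len, B_len])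
  intro i h1 h2
  have hi : i < 45 := by rw [A_len S] at h1; exact h1
  have ha := A_getD S i hi
  have hb := B_getD S i hi
  rw [List.getD_eq_getElem _ _ h1] at ha
  rw [List.getD_eq_getElem _ _ h2] at hb
  rw [ha, hb]
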